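-- pv_equiv track=rewrite | github.com/Yong2Sheng/photozpy | src/photozpy/sources/sources.py | unwarp_dictionary
-- ===== SOURCE A (Python) =====
-- from itertools import product
--
-- def unwarp_dictionary(dictionary):
--
--     """
--     Unwarp a dictionary to produce a dictionary list whose element is a dictionary that contains all the combinations of
--     values for the headers.
--
--     Parameters
--     ----------
--     dictionary: dict; the input dictionary
--
--     Returns
--     -------
--     dict_list: list; the list of all dictionaries that exhausts all the combination of the values.
--     """
--
--     # make sure all the values are lists instead of strings or numbers
--     for header, value in dictionary.items():
--         if not isinstance(value, list):
--             dictionary[header] = [value]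
--
--     # get all the combinations of values from different headers
--     values = list(product(*list(dictionary.values())))
--
--     headers = list(dictionary.keys())
--
--     dict_list = []
--     for i in values:
--         dict_ = dict(zip(headers, i))  # assemble headers and values. Note that headers are always the same. We just iterate through the combination of the values.
--         dict_list += [dict_]
--
--     return dict_list
-- ===== SOURCE B (Python) =====
-- def unwarp_dictionary(dictionary):
--     # same in-place normalization side effect as A
--     for header, value in dictionary.items():
--         if not isinstance(value, list):
--             dictionary[header] = [value]
--
--     # incremental Cartesian product: extend partial dicts header by header,
--     # varying the most recently added header fastest (product's ordering)
--     result = [{}]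
--     for header in dictionary:
--         result = [{**partial, header: v} for partial in result for v in dictionary[header]]
--     return result
-- ===== Notes on version B (the rewrite author's own statement) =====
-- stated objective: alternative
-- what changed: Replaces itertools.product over all value lists plus a zip/dict assembly loop with an incremental fold that starts from a single empty partial dict and extends each partial dict header by header.
import Mathlib
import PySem

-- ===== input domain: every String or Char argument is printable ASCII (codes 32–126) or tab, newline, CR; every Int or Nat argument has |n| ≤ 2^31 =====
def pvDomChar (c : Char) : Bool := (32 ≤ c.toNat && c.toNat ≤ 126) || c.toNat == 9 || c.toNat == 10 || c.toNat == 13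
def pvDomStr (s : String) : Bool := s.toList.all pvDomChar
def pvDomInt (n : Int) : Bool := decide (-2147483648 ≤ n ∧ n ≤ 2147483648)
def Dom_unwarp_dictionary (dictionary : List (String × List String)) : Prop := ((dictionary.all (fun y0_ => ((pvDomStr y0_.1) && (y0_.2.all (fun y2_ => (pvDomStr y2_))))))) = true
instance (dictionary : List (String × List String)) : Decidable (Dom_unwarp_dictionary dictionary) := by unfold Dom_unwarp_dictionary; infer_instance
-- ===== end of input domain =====

-- B replaces itertools.product + zip/dict assembly by an incremental fold extending partial dicts header by header (alternative decomposition, same cost).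


-- ===== PORT A =====
-- itertools.product(*lists): rightmost factor varies fastest
def prodAll : List (List String) → List (List String)
  | [] => [[]]
  | vs :: rest => vs.flatMap (fun v => (prodAll rest).map (fun t => v :: t))

-- In the Lean types every value is already a List String, so A's normalization
-- loop ("wrap non-list values") is the identity and has no counterpart.
-- dict(zip(headers, i)) is ported as headers.zip i: exact because Pre_ requires
-- pairwise-distinct headers (a Python dict cannot have duplicate keys).
def unwarp_dictionary (dictionary : List (String × List String)) : List (List (String × String)) :=
  let values := prodAll (dictionary.map (fun p => p.2))
  let headers := dictionary.map (fun p => p.1)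
  values.foldl (fun acc i => acc ++ [headers.zip i]) []

-- ===== PORT B =====
def unwarp_dictionary_alt (dictionary : List (String × List String)) : List (List (String × String)) :=
  dictionary.foldl
    (fun result hv => result.flatMap (fun partial_ => hv.2.map (fun v => partial_ ++ [(hv.1, v)])))
    [[]]

-- ===== PRECONDITION & SPEC =====
-- Pre_ excludes association lists with duplicate keys: those do not represent any
-- Python dict (A's argument type), so A is never called on them.
def Pre_unwarp_dictionary (dictionary : List (String × List String)) : Prop :=
  (dictionary.map (fun p => p.1)).Nodup
instance (dictionary : List (String × List String)) : Decidable (Pre_unwarp_dictionary dictionary) := by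
  unfold Pre_unwarp_dictionary; infer_instance

def pvWitness_unwarp_dictionary : (List (String × List String)) :=
  [("a", ["1", "2"]), ("b", ["x"])]

def Spec_unwarp_dictionary (dictionary : List (String × List String)) (out : List (List (String × String))) : Prop := out = unwarp_dictionary_alt dictionary
instance (dictionary : List (String × List String)) (out : List (List (String × String))) : Decidable (Spec_unwarp_dictionary dictionary out) := by unfold Spec_unwarp_dictionary; infer_instance

-- ===== CLAIM (what is proved, stated in full; the proofs are below) =====
def Claim_equal_unwarp_dictionary : Prop := ∀ (dictionary : List (String × List String)), Dom_unwarp_dictionary dictionary → Pre_unwarp_dictionary dictionary → Spec_unwarp_dictionary dictionary (unwarp_dictionary dictionary)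

-- ===== LEMMAS AND PROOFS =====

-- the product of an association list, producing the rows directly
def prodZ : List (String × List String) → List (List (String × String))
  | [] => [[]]
  | (h, vs) :: rest => vs.flatMap (fun v => (prodZ rest).map (fun t => (h, v) :: t))

theorem foldl_snoc {α β : Type} (f : α → β) :
    ∀ (l : List α) (acc : List β), l.foldl (fun a i => a ++ [f i]) acc = acc ++ l.map f := by
  intro l
  induction l with
  | nil => simp
  | cons x xs ih => intro acc; simp [List.foldl_cons, ih]

theorem alt_foldl_eq (d : List (String × List String)) :
    ∀ acc : List (List (String × String)),
      d.foldl (fun result hv => result.flatMap (fun p => hv.2.map (fun v => p ++ [(hv.1, v)]))) acc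
        = acc.flatMap (fun p => (prodZ d).map (fun q => p ++ q)) := by
  induction d with
  | nil => intro acc; simp [prodZ]
  | cons hv rest ih =>
    intro acc
    obtain ⟨h, vs⟩ := hv
    rw [List.foldl_cons, ih]
    simp only [prodZ, List.flatMap_assoc, List.map_flatMap, List.map_map, Function.comp_def]
    congr 1
    funext x
    rw [List.flatMap_map]
    congr 1
    funext v
    simp [List.append_assoc]

theorem zip_prodAll (d : List (String × List String)) :
    (prodAll (d.map (fun p => p.2))).map (fun c => (d.map (fun p => p.1)).zip c) = prodZ d := by
  induction d with
  | nil => simp [prodAll, prodZ]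
  | cons hv rest ih =>
    obtain ⟨h, vs⟩ := hv
    simp only [List.map_cons, prodAll, prodZ, List.map_flatMap, List.map_map]
    congr 1
    funext v
    rw [← ih, List.map_map]
    rfl

-- ===== VERDICT (by name: the statement is the Claim_ definition above) =====
theorem unwarp_dictionary_spec : Claim_equal_unwarp_dictionary := by
  intro d _ _
  show unwarp_dictionary d = unwarp_dictionary_alt d
  unfold unwarp_dictionary unwarp_dictionary_alt
  rw [foldl_snoc, alt_foldl_eq, zip_prodAll]
  simp
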